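-- pv_equiv track=rewrite | github.com/constancebonomi/chichou-s-slay | apistep2.py | recipesearch
-- ===== SOURCE A (Python) =====
-- def recipesearch (chosen_ingredients_list = [], recipedict_withingredients = {}):
--
--     #This function takes a list of ingredients and returns the 5 recipes in the TheMealDB database
--     #that contain the most of these ingredients
--
--     #This part of the function defines a dictionary with each recipe name and
--     #its corresponding similarity score to the chosen ingredients list.
--
--     recipedict_withscores = {}
--     for recipename, recipe_ingredients_list in recipedict_withingredients.items():
--         for recipe_ingredient in set(recipe_ingredients_list):
--             #set because some TheMealDB recipes contain duplicate ingredients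
--             #The function below creates a score field for a recipe if it's empty, and adds one if it exists
--             if recipe_ingredient in chosen_ingredients_list:
--                 if recipedict_withscores.get(recipename) == None:
--                        recipedict_withscores[recipename] = 1
--                 else: recipedict_withscores[recipename] += 1
--
--     #This part of the function defines a dictionary with the top five recipes and
--     #their corresponding similarity scores to the chosen ingredients list.
--
--     recipes_result = {}
--     recipe_results_length = 0
--     for diminishing_similarity_coefficient in range(3):
--         #this is a variable that will be substracted from len(chosen ingredients), so that the most fitting recipes appear first
--         for recipestr, recipescore in recipedict_withscores.items():
--             if recipe_results_length < 5:
--                 #the maximal number of recommendations is set to five.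
--                 if recipescore == (len(chosen_ingredients_list) - diminishing_similarity_coefficient):
--                         recipes_result[recipestr] = recipescore
--                         recipe_results_length += 1
--
--     return recipes_result
-- ===== SOURCE B (Python) =====
-- def recipesearch(chosen_ingredients_list=[], recipedict_withingredients={}):
--     # Score each recipe in one shot (count of distinct shared ingredients),
--     # then bucket recipe names by score and emit the three target scores in order.
--     scores = {}
--     for recipename, ings in recipedict_withingredients.items():
--         score = sum(1 for ing in set(ings) if ing in chosen_ingredients_list)
--         if score:
--             scores[recipename] = score
--     buckets = {}
--     for recipename, score in scores.items():
--         buckets.setdefault(score, []).append(recipename)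
--     n = len(chosen_ingredients_list)
--     recipes_result = {}
--     count = 0
--     for target in (n, n - 1, n - 2):
--         for recipename in buckets.get(target, []):
--             if count < 5:
--                 recipes_result[recipename] = target
--                 count += 1
--     return recipes_result
-- ===== Notes on version B (the rewrite author's own statement) =====
-- stated objective: alternative
-- what changed: Per-recipe score is computed in one shot (count of distinct shared ingredients) instead of incremental dict updates, and the three repeated full scans of the score dict are replaced by a score-to-names bucket index built in one pass and emitted for the three target scores with a global 5-item cutoff.
import Mathlib
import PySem

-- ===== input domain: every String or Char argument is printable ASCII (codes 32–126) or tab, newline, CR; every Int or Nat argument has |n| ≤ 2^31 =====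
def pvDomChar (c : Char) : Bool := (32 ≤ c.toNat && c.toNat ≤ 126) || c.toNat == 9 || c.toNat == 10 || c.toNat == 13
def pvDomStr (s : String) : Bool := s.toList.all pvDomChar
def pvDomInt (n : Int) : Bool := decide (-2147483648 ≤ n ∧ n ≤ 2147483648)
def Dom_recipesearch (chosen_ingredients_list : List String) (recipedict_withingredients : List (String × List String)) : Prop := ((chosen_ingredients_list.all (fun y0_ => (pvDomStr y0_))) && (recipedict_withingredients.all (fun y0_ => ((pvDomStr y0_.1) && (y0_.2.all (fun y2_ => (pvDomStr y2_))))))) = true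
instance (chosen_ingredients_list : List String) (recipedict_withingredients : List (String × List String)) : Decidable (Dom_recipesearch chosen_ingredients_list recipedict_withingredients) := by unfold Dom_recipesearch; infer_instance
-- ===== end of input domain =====

-- B replaces A's three repeated full scans of the score dict by a score→names bucket index
-- built in one pass, emitted for the three target scores with a global 5-item cutoff (objective: alternative).

-- ===== PORT A =====
def recipesearch (chosen_ingredients_list : List String) (recipedict_withingredients : List (String × List String)) : List (String × Int) :=
  let d := PySem.Dict.ofList recipedict_withingredients
  let recipedict_withscores : PySem.Dict String Int :=
    d.items.foldl (fun sc p =>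
      (PySem.Set.ofList p.2).foldl (fun sc ing =>
        if chosen_ingredients_list.contains ing then
          match sc.get? p.1 with
          | none => sc.insert p.1 (1 : Int)
          | some v => sc.insert p.1 (v + 1)
        else sc) sc) PySem.Dict.empty
  let res : PySem.Dict String Int × Int :=
    (PySem.List.pyRange 0 3 1).foldl (fun st coef =>
      recipedict_withscores.items.foldl (fun st p =>
        if st.2 < 5 then
          if p.2 == ((chosen_ingredients_list.length : Int) - coef) then
            (st.1.insert p.1 p.2, st.2 + 1)
          else st
        else st) st) (PySem.Dict.empty, (0 : Int))
  res.1.items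

-- ===== PORT B =====
def recipesearch_alt (chosen_ingredients_list : List String) (recipedict_withingredients : List (String × List String)) : List (String × Int) :=
  let d := PySem.Dict.ofList recipedict_withingredients
  let scores : PySem.Dict String Int :=
    d.items.foldl (fun sc p =>
      let score : Int := (((PySem.Set.ofList p.2).filter (fun ing => chosen_ingredients_list.contains ing)).length : Int)
      if score ≠ 0 then sc.insert p.1 score else sc) PySem.Dict.empty
  let buckets : PySem.Dict Int (List String) :=
    scores.items.foldl (fun b p => b.modify p.2 [] (fun l => l ++ [p.1])) PySem.Dict.empty
  let n : Int := chosen_ingredients_list.length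
  let res : PySem.Dict String Int × Int :=
    [n, n - 1, n - 2].foldl (fun st t =>
      (buckets.getD t []).foldl (fun st name =>
        if st.2 < 5 then (st.1.insert name t, st.2 + 1) else st) st) (PySem.Dict.empty, (0 : Int))
  res.1.items

-- ===== PRECONDITION & SPEC =====
def Spec_recipesearch (chosen_ingredients_list : List String) (recipedict_withingredients : List (String × List String)) (out : List (String × Int)) : Prop := out = recipesearch_alt chosen_ingredients_list recipedict_withingredients
instance (chosen_ingredients_list : List String) (recipedict_withingredients : List (String × List String)) (out : List (String × Int)) : Decidable (Spec_recipesearch chosen_ingredients_list recipedict_withingredients out) := by unfold Spec_recipesearch; infer_instance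

-- ===== CLAIM (what is proved, stated in full; the proofs are below) =====
def Claim_equal_recipesearch : Prop := ∀ (chosen_ingredients_list : List String) (recipedict_withingredients : List (String × List String)), Dom_recipesearch chosen_ingredients_list recipedict_withingredients → Spec_recipesearch chosen_ingredients_list recipedict_withingredients (recipesearch chosen_ingredients_list recipedict_withingredients)

-- ===== LEMMAS AND PROOFS =====

-- Overwriting a key with the value it already has is a no-op (nodup keys).
theorem insert_get?_self_eq {d : PySem.Dict String Int} {r : String} {c : Int}
    (hnd : d.keys.Nodup) (h : d.get? r = some c) : d.insert r c = d := by
  have hc : d.contains r = true := by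
    rw [PySem.Dict.contains_eq_isSome_get?, h]; rfl
  apply PySem.Dict.ext
  rw [PySem.Dict.items_insert_of_contains _ _ hc]
  have hid : ∀ p ∈ d.items, (fun p : String × Int => if (p.1 == r) = true then (r, c) else p) p = p := by
    intro p hp
    by_cases hpr : (p.1 == r) = true
    · have hr : p.1 = r := by simpa using hpr
      have hv : d.get? p.1 = some p.2 := PySem.Dict.get?_of_mem_items d (by simpa using hp) hnd
      rw [hr, h] at hv
      simp only [hpr, if_true]
      rw [← hr, (Option.some_inj.mp hv)]
    · simp [hpr]
  rw [List.map_congr_left hid]; simp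

-- A's inner ingredient loop once the recipe already has a score c: it adds the match count.
theorem innerA_some (chosen : List String) (r : String) :
    ∀ (l : List String) (sc : PySem.Dict String Int) (c : Int), sc.keys.Nodup → sc.get? r = some c →
      l.foldl (fun sc ing =>
        if chosen.contains ing then
          match sc.get? r with
          | none => sc.insert r (1 : Int)
          | some v => sc.insert r (v + 1)
        else sc) sc
      = sc.insert r (c + ((l.filter (fun i => chosen.contains i)).length : Int)) := by
  intro l
  induction l with
  | nil =>
    intro sc c hnd h
    simp only [List.foldl_nil, List.filter_nil, List.length_nil, Int.natCast_zero, add_zero]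
    exact (insert_get?_self_eq hnd h).symm
  | cons ing tl ih =>
    intro sc c hnd h
    by_cases hm : chosen.contains ing = true
    · rw [List.foldl_cons, if_pos hm, h]
      rw [ih (sc.insert r (c + 1)) (c + 1) (PySem.Dict.nodup_keys_insert _ _ _ hnd) (PySem.Dict.get?_insert_self _ _ _)]
      rw [PySem.Dict.insert_insert_self]
      congr 1
      simp only [List.filter_cons, hm, if_true, List.length_cons]
      push_cast
      ring
    · rw [List.foldl_cons, if_neg hm]
      rw [ih sc c hnd h]
      congr 2
      simp only [List.filter_cons, hm, Bool.false_eq_true, if_false]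

-- A's inner ingredient loop on a fresh recipe name equals B's one-shot count-and-insert.
theorem innerA_none (chosen : List String) (r : String) :
    ∀ (l : List String) (sc : PySem.Dict String Int), sc.keys.Nodup → sc.get? r = none →
    l.foldl (fun sc ing =>
      if chosen.contains ing then
        match sc.get? r with
        | none => sc.insert r (1 : Int)
        | some v => sc.insert r (v + 1)
      else sc) sc
    = (if (((l.filter (fun i => chosen.contains i)).length : Int)) ≠ 0 then
        sc.insert r (((l.filter (fun i => chosen.contains i)).length : Int)) else sc) := by
  intro l
  induction l with
  | nil => intro sc hnd h; simp
  | cons ing tl ih =>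
    intro sc hnd h
    by_cases hm : chosen.contains ing = true
    · rw [List.foldl_cons, if_pos hm, h]
      rw [innerA_some chosen r tl (sc.insert r 1) 1
            (PySem.Dict.nodup_keys_insert _ _ _ hnd) (PySem.Dict.get?_insert_self _ _ _)]
      rw [PySem.Dict.insert_insert_self]
      simp only [List.filter_cons, hm, if_true, List.length_cons]
      rw [if_pos (by push_cast; omega)]
      congr 1
      push_cast
      ring
    · rw [List.foldl_cons, if_neg hm, ih sc hnd h]
      simp only [List.filter_cons, hm, Bool.false_eq_true, if_false]

-- The two score-building folds agree on any list of recipes with distinct fresh names.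
theorem scores_eq (chosen : List String) :
    ∀ (l : List (String × List String)) (sc : PySem.Dict String Int),
      sc.keys.Nodup → (l.map Prod.fst).Nodup → (∀ p ∈ l, sc.get? p.1 = none) →
      l.foldl (fun sc p =>
        (PySem.Set.ofList p.2).foldl (fun sc ing =>
          if chosen.contains ing then
            match sc.get? p.1 with
            | none => sc.insert p.1 (1 : Int)
            | some v => sc.insert p.1 (v + 1)
          else sc) sc) sc
      = l.foldl (fun sc p =>
          let score : Int := (((PySem.Set.ofList p.2).filter (fun ing => chosen.contains ing)).length : Int)
          if score ≠ 0 then sc.insert p.1 score else sc) sc := by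
  intro l
  induction l with
  | nil => intro sc _ _ _; rfl
  | cons p tl ih =>
    intro sc hnd hln hfresh
    have hln' : (p.1 ∉ tl.map Prod.fst) ∧ (tl.map Prod.fst).Nodup := by
      rw [List.map_cons, List.nodup_cons] at hln; exact hln
    rw [List.foldl_cons, List.foldl_cons,
        innerA_none chosen p.1 (PySem.Set.ofList p.2) sc hnd (hfresh p (List.mem_cons_self))]
    show _ = tl.foldl _ (if (((PySem.Set.ofList p.2).filter (fun ing => chosen.contains ing)).length : Int) ≠ 0 then
        sc.insert p.1 (((PySem.Set.ofList p.2).filter (fun ing => chosen.contains ing)).length : Int) else sc)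
    split_ifs with hz
    · exact ih _ (PySem.Dict.nodup_keys_insert _ _ _ hnd) hln'.2 (fun q hq => by
        rw [PySem.Dict.get?_insert_of_ne]
        · exact hfresh q (List.mem_cons_of_mem _ hq)
        · intro he; exact hln'.1 (he ▸ List.mem_map_of_mem hq))
    · exact ih _ hnd hln'.2 (fun q hq => hfresh q (List.mem_cons_of_mem _ hq))

-- One scan of the score dict for target t = one scan of t's bucket.
theorem pass_eq (t : Int) :
    ∀ (items : List (String × Int)) (st : PySem.Dict String Int × Int),
      items.foldl (fun st p =>
        if st.2 < 5 then
          if p.2 == t then (st.1.insert p.1 p.2, st.2 + 1) else st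
        else st) st
      = ((items.filter (fun p => p.2 == t)).map Prod.fst).foldl
          (fun st name => if st.2 < 5 then (st.1.insert name t, st.2 + 1) else st) st := by
  intro items
  induction items with
  | nil => intro st; rfl
  | cons p tl ih =>
    intro st
    rw [List.foldl_cons, List.filter_cons]
    by_cases hp : (p.2 == t) = true
    · have ht : p.2 = t := by simpa using hp
      rw [if_pos hp, if_pos hp, ht, List.map_cons, List.foldl_cons]
      exact ih _
    · rw [if_neg hp, if_neg hp, ite_self]
      exact ih st

-- The bucket for score t holds exactly the names scored t, in dict order.
theorem bucket_eq (items : List (String × Int)) (t : Int) :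
    (items.foldl (fun (b : PySem.Dict Int (List String)) p => b.modify p.2 [] (fun l => l ++ [p.1]))
      PySem.Dict.empty).getD t []
    = (items.filter (fun p => p.2 == t)).map Prod.fst := by
  rw [show items.foldl (fun (b : PySem.Dict Int (List String)) p => b.modify p.2 [] (fun l => l ++ [p.1]))
        PySem.Dict.empty
      = (items.map (fun p => (p.2, p.1))).foldl
          (fun (b : PySem.Dict Int (List String)) q => b.modify q.1 [] (fun l => l ++ [q.2]))
          PySem.Dict.empty from by rw [List.foldl_map]]
  rw [PySem.Dict.getD_foldl_modify_append]
  simp [List.filter_map, List.map_map, Function.comp_def]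

-- ===== VERDICT (by name: the statement is the Claim_ definition above) =====
theorem recipesearch_spec : Claim_equal_recipesearch := by
  intro chosen rd _
  unfold Spec_recipesearch
  simp only [recipesearch, recipesearch_alt]
  have hnd : (PySem.Dict.ofList rd : PySem.Dict String (List String)).keys.Nodup :=
    PySem.Dict.nodup_keys_ofList _
  have hmap : ((PySem.Dict.ofList rd : PySem.Dict String (List String)).items.map Prod.fst).Nodup := by
    simpa [PySem.Dict.keys] using hnd
  rw [scores_eq chosen _ PySem.Dict.empty (by simp) hmap (by simp)]
  rw [show PySem.List.pyRange 0 3 1 = [0, 1, 2] from by decide]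
  simp only [List.foldl_cons, List.foldl_nil]
  simp only [pass_eq, bucket_eq]
  norm_num
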